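-- pv_equiv track=rewrite | github.com/Sunnysandhu28/athena-Management-system-project | conversation_dataset_integrator.py | _parse_text_conversations
-- ===== SOURCE A (Python) =====
-- def _parse_text_conversations(text_content):
--     """Parse text file containing conversations"""
--     conversations = []
--     lines = text_content.strip().split('\n')
--
--     current_conversation = {}
--
--     for line in lines:
--         line = line.strip()
--         if not line:
--             if current_conversation:
--                 conversations.append(current_conversation)
--                 current_conversation = {}
--             continue
--
--         if line.startswith('User:') or line.startswith('USER:'):
--             current_conversation['user'] = line.split(':', 1)[1].strip()
--         elif line.startswith('Assistant:') or line.startswith('SIM:') or line.startswith('AI:'):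
--             current_conversation['assistant'] = line.split(':', 1)[1].strip()
--         elif line.startswith('Context:'):
--             current_conversation['context'] = line.split(':', 1)[1].strip()
--
--     if current_conversation:
--         conversations.append(current_conversation)
--
--     return {"conversations": conversations}
-- ===== SOURCE B (Python) =====
-- def _conv_of(block):
--     conv = {}
--     for line in block:
--         if line.startswith('User:') or line.startswith('USER:'):
--             conv['user'] = line.split(':', 1)[1].strip()
--         elif line.startswith('Assistant:') or line.startswith('SIM:') or line.startswith('AI:'):
--             conv['assistant'] = line.split(':', 1)[1].strip()
--         elif line.startswith('Context:'):
--             conv['context'] = line.split(':', 1)[1].strip()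
--     return conv
--
--
-- def _parse_text_conversations(text_content):
--     lines = [l.strip() for l in text_content.strip().split('\n')]
--     blocks = []
--     block = []
--     for line in lines:
--         if line == '':
--             if block:
--                 blocks.append(block)
--             block = []
--         else:
--             block.append(line)
--     if block:
--         blocks.append(block)
--     conversations = [c for c in map(_conv_of, blocks) if c]
--     return {"conversations": conversations}
-- ===== Notes on version B (the rewrite author's own statement) =====
-- stated objective: alternative
-- what changed: Replaces A's fused one-pass state machine (conversations list + mutable current dict flushed on blank lines) by two separate passes: first group the stripped lines into blank-separated blocks, then map each block to a dict and keep the non-empty ones.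
import Mathlib
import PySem

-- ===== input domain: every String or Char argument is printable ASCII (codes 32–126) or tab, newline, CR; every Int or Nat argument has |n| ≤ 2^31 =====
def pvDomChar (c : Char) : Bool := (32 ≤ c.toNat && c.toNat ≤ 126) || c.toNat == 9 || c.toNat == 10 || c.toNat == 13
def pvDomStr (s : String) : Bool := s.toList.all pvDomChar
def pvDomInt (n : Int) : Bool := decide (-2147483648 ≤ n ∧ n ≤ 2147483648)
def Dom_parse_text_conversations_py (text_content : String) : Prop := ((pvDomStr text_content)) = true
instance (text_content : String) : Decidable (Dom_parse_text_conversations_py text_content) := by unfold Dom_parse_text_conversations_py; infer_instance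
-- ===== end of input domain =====

-- B regroups A's fused state machine into two passes (blank-separated blocks, then per-block dicts); equal return value, no speed claim.

-- ===== PORT A =====
-- line.split(':', 1)[1].strip() — the identical expression both Pythons use; in every
-- guarded branch the line starts with a prefix containing ':', so split yields two parts
-- and the fallback "" is unreachable (Python would raise IndexError only without ':').
def pvAfterColon (s : String) : String :=
  match PySem.Str.splitMax? s ":" 1 with
  | some (_ :: v :: _) => PySem.Str.strip v
  | _ => ""

-- one iteration of A's for-loop, state = (conversations, current_conversation)
def pvAStep (st : List (PySem.Dict String String) × PySem.Dict String String)
    (line0 : String) : List (PySem.Dict String String) × PySem.Dict String String :=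
  let line := PySem.Str.strip line0
  if line = "" then
    if st.2.items ≠ [] then (st.1 ++ [st.2], PySem.Dict.empty) else st
  else if PySem.Str.startswith line "User:" || PySem.Str.startswith line "USER:" then
    (st.1, st.2.insert "user" (pvAfterColon line))
  else if PySem.Str.startswith line "Assistant:" || PySem.Str.startswith line "SIM:" || PySem.Str.startswith line "AI:" then
    (st.1, st.2.insert "assistant" (pvAfterColon line))
  else if PySem.Str.startswith line "Context:" then
    (st.1, st.2.insert "context" (pvAfterColon line))
  else st

def parse_text_conversations_py (text_content : String) : List (String × List (List (String × String))) :=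
  let lines := (PySem.Str.split? (PySem.Str.strip text_content) "\n").getD []
  let st := lines.foldl pvAStep ([], PySem.Dict.empty)
  let conversations := if st.2.items ≠ [] then st.1 ++ [st.2] else st.1
  [("conversations", conversations.map (fun d => d.items))]

-- ===== PORT B =====
-- the body of _conv_of's for-loop: assign user/assistant/context by prefix
def pvConvLine (conv : PySem.Dict String String) (line : String) : PySem.Dict String String :=
  if PySem.Str.startswith line "User:" || PySem.Str.startswith line "USER:" then
    conv.insert "user" (pvAfterColon line)
  else if PySem.Str.startswith line "Assistant:" || PySem.Str.startswith line "SIM:" || PySem.Str.startswith line "AI:" then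
    conv.insert "assistant" (pvAfterColon line)
  else if PySem.Str.startswith line "Context:" then
    conv.insert "context" (pvAfterColon line)
  else conv

-- _conv_of: fold the block's lines into a dict
def pvConvOf (block : List String) : PySem.Dict String String :=
  block.foldl pvConvLine PySem.Dict.empty

-- grouping pass, state = (blocks, block)
def pvGroupStep (st : List (List String) × List String) (line : String) :
    List (List String) × List String :=
  if line = "" then
    (if st.2 ≠ [] then st.1 ++ [st.2] else st.1, [])
  else (st.1, st.2 ++ [line])

def parse_text_conversations_py_alt (text_content : String) : List (String × List (List (String × String))) :=
  let lines := ((PySem.Str.split? (PySem.Str.strip text_content) "\n").getD []).map PySem.Str.strip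
  let g := lines.foldl pvGroupStep ([], [])
  let blocks := if g.2 ≠ [] then g.1 ++ [g.2] else g.1
  let conversations := (blocks.map pvConvOf).filter (fun d => d.items ≠ [])
  [("conversations", conversations.map (fun d => d.items))]

-- ===== PRECONDITION & SPEC =====
def Spec_parse_text_conversations_py (text_content : String) (out : List (String × List (List (String × String)))) : Prop := out = parse_text_conversations_py_alt text_content
instance (text_content : String) (out : List (String × List (List (String × String)))) : Decidable (Spec_parse_text_conversations_py text_content out) := by unfold Spec_parse_text_conversations_py; infer_instance

-- ===== CLAIM (what is proved, stated in full; the proofs are below) =====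
def Claim_equal_parse_text_conversations_py : Prop := ∀ (text_content : String), Dom_parse_text_conversations_py text_content → Spec_parse_text_conversations_py text_content (parse_text_conversations_py text_content)

-- ===== LEMMAS AND PROOFS =====

-- A's final flush
def pvFinishA (st : List (PySem.Dict String String) × PySem.Dict String String) :
    List (PySem.Dict String String) :=
  if st.2.items ≠ [] then st.1 ++ [st.2] else st.1

-- B's pipeline from a partially accumulated block (blocks accumulator factored out
-- by pvGroup_acc), applied to raw lines: strip, group, map to dicts, drop empties
def pvPipe (ls : List String) (b : List String) : List (PySem.Dict String String) :=
  (((let g := (ls.map PySem.Str.strip).foldl pvGroupStep ([], b);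
     if g.2 ≠ [] then g.1 ++ [g.2] else g.1).map pvConvOf).filter (fun d => d.items ≠ []))

lemma pvGroup_acc (ls : List String) (bs : List (List String)) (b : List String) :
    ls.foldl pvGroupStep (bs, b)
      = (bs ++ (ls.foldl pvGroupStep ([], b)).1, (ls.foldl pvGroupStep ([], b)).2) := by
  induction ls generalizing bs b with
  | nil => simp
  | cons l ls ih =>
    simp only [List.foldl_cons, pvGroupStep]
    by_cases hl : l = ""
    · simp only [hl]
      by_cases hb : b = [] <;>
        simp [hb, ih (bs ++ [b]) [], ih [b] [], ih bs []]
    · simp [hl, ih bs (b ++ [l])]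

lemma pvConvOf_snoc (b : List String) (s : String) :
    pvConvOf (b ++ [s]) = pvConvLine (pvConvOf b) s := by
  simp [pvConvOf]

lemma pvConvOf_empty_of_items_nil {b : List String} (h : (pvConvOf b).items = []) :
    pvConvOf b = PySem.Dict.empty := by
  apply PySem.Dict.ext
  simpa using h

lemma pvPipe_blank {l : String} (hs : PySem.Str.strip l = "") (ls : List String) (b : List String) :
    pvPipe (l :: ls) b
      = ((if b ≠ [] then [b] else []).map pvConvOf).filter (fun d => d.items ≠ [])
        ++ pvPipe ls [] := by
  have h1 : pvGroupStep ([], b) (PySem.Str.strip l) = ((if b ≠ [] then [b] else []), []) := by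
    rw [hs]
    by_cases hb : b = [] <;> simp [pvGroupStep, hb]
  simp only [pvPipe, List.map_cons, List.foldl_cons, h1]
  rw [pvGroup_acc (ls.map PySem.Str.strip) (if b ≠ [] then [b] else []) []]
  split_ifs <;> simp [List.filter_append, List.filter_cons] <;> split <;> simp

lemma pvPipe_nonblank {l : String} (hs : ¬ PySem.Str.strip l = "") (ls : List String) (b : List String) :
    pvPipe (l :: ls) b = pvPipe ls (b ++ [PySem.Str.strip l]) := by
  simp [pvPipe, pvGroupStep, hs]

lemma pvMain (ls : List String) (convs : List (PySem.Dict String String)) (b : List String) :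
    pvFinishA (ls.foldl pvAStep (convs, pvConvOf b)) = convs ++ pvPipe ls b := by
  induction ls generalizing convs b with
  | nil =>
    simp only [List.foldl_nil, pvFinishA, pvPipe, List.map_nil, List.foldl_nil]
    by_cases hb : b = []
    · subst hb
      simp [pvConvOf, PySem.Dict.empty]
    · by_cases hd : (pvConvOf b).items = [] <;> simp [hb, hd]
  | cons l ls ih =>
    by_cases hs : PySem.Str.strip l = ""
    · have hstep : pvAStep (convs, pvConvOf b) l
          = if (pvConvOf b).items ≠ [] then (convs ++ [pvConvOf b], PySem.Dict.empty)
            else (convs, pvConvOf b) := by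
        simp [pvAStep, hs]
      rw [List.foldl_cons, hstep, pvPipe_blank hs]
      by_cases hd : (pvConvOf b).items = []
      · have hb0 : pvConvOf b = pvConvOf [] := by
          rw [pvConvOf_empty_of_items_nil hd]; rfl
        rw [if_neg (by simpa using hd), hb0, ih convs []]
        by_cases hb : b = [] <;> simp [hb, hd]
      · have hb : b ≠ [] := by
          intro h
          exact hd (by rw [h]; rfl)
        rw [if_pos hd, show PySem.Dict.empty = pvConvOf ([] : List String) from rfl,
            ih (convs ++ [pvConvOf b]) []]
        simp [hb, hd]
    · have hstep : pvAStep (convs, pvConvOf b) l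
          = (convs, pvConvOf (b ++ [PySem.Str.strip l])) := by
        rw [pvConvOf_snoc]
        simp only [pvAStep, pvConvLine]
        rw [if_neg hs]
        split_ifs <;> rfl
      rw [List.foldl_cons, hstep, pvPipe_nonblank hs, ih]

-- ===== VERDICT (by name: the statement is the Claim_ definition above) =====
theorem parse_text_conversations_py_spec : Claim_equal_parse_text_conversations_py := by
  intro t _
  show parse_text_conversations_py t = parse_text_conversations_py_alt t
  simp only [parse_text_conversations_py, parse_text_conversations_py_alt]
  rw [show PySem.Dict.empty = pvConvOf ([] : List String) from rfl]
  have h := pvMain ((PySem.Str.split? (PySem.Str.strip t) "\n").getD []) [] []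
  simp only [pvFinishA, pvPipe, List.nil_append] at h
  rw [h]
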